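-- pv_equiv track=rewrite | github.com/luoluomashang/narrativespace | scripts/archive_long_lines.py | prune_memory
-- ===== SOURCE A (Python) =====
-- from typing import List, Dict, Any
--
-- def prune_memory(memory_content: str, archivable_sections: List[Dict]) -> str:
--     """
--     从memory.md中删除已归档的行。
--
--     为了安全，我们标记而不是删除。
--         - 将被归档的行改为 <!-- ARCHIVED -->[原始内容]<!-- /ARCHIVED -->
--     """
--     lines = memory_content.split("\n")
--
--     # 标记所有待删除的行
--     to_mark = set()
--     for section in archivable_sections:
--         for i in range(section["start_line"], section["end_line"]):
--             to_mark.add(i)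
--
--     # 实际上，为了保守起见，仅将关键行标记，不真正删除
--     # 而是插入"已归档"标记
--     result_lines = []
--     for i, line in enumerate(lines):
--         if i in to_mark and line.strip() and not line.strip().startswith("#"):
--             # 非标题行，插入标记
--             result_lines.append(f"<!-- ARCHIVED CH{i} --> {line}")
--         else:
--             result_lines.append(line)
--
--     return "\n".join(result_lines)
-- ===== SOURCE B (Python) =====
-- def prune_memory(memory_content: str, archivable_sections):
--     # Single pass, no precomputed index: test each line against the sections directly.
--     out = []
--     for i, line in enumerate(memory_content.split("\n")):
--         s = line.strip()
--         if s and not s.startswith("#") and any(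
--             sec["start_line"] <= i < sec["end_line"] for sec in archivable_sections
--         ):
--             out.append(f"<!-- ARCHIVED CH{i} --> {line}")
--         else:
--             out.append(line)
--     return "\n".join(out)
-- ===== Notes on version B (the rewrite author's own statement) =====
-- stated objective: simpler
-- what changed: Drops the precomputed to_mark set of all covered line numbers and instead tests each line inline with any(start <= i < end over the sections), turning build-index-then-pass into a single pass with a direct interval test.
import Mathlib
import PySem

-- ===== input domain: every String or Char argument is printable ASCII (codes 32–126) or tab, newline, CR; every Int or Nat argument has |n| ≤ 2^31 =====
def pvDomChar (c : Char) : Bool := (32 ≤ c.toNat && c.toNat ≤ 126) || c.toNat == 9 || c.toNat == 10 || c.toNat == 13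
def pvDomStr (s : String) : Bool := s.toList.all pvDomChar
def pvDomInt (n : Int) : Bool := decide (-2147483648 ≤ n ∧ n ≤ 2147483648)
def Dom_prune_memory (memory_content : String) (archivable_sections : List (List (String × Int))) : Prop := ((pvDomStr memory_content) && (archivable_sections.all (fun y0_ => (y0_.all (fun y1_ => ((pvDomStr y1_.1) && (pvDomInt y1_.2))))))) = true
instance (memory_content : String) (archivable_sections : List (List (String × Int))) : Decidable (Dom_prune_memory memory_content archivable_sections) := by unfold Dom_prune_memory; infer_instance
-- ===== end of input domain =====

-- B replaces A's precomputed set of covered line numbers by an inline interval scan per line ('simpler').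

-- ===== PORT A =====
-- to_mark = set(); for section in archivable_sections: for i in range(start, end): to_mark.add(i)
def pruneToMark (archivable_sections : List (List (String × Int))) : PySem.Set Int :=
  archivable_sections.foldl (fun acc sec =>
    match (PySem.Dict.mk sec).get? "start_line", (PySem.Dict.mk sec).get? "end_line" with
    | some a, some b => (PySem.List.pyRange a b).foldl (fun s i => s.add i) acc
    | _, _ => acc) PySem.Set.empty
    -- a missing key is a KeyError in Python: excluded by Pre_ (the 'acc' branch is unreachable there)

def prune_memory (memory_content : String) (archivable_sections : List (List (String × Int))) : String :=
  let lines := (PySem.Str.split? memory_content "\n").getD []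
  let to_mark := pruneToMark archivable_sections
  let result_lines := (PySem.List.enumerate lines).foldl (fun acc p =>
    if to_mark.contains p.1 ∧ PySem.Str.strip p.2 ≠ "" ∧ ¬ PySem.Str.startswith (PySem.Str.strip p.2) "#"
    then acc ++ ["<!-- ARCHIVED CH" ++ PySem.Int.toStr p.1 ++ " --> " ++ p.2]
    else acc ++ [p.2]) []
  PySem.Str.join "\n" result_lines

-- ===== PORT B =====
def prune_memory_alt (memory_content : String) (archivable_sections : List (List (String × Int))) : String :=
  PySem.Str.join "\n" ((PySem.List.enumerate ((PySem.Str.split? memory_content "\n").getD [])).map (fun p =>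
    let s := PySem.Str.strip p.2
    if s ≠ "" ∧ ¬ PySem.Str.startswith s "#" ∧ archivable_sections.any (fun sec =>
        match (PySem.Dict.mk sec).get? "start_line", (PySem.Dict.mk sec).get? "end_line" with
        | some a, some b => decide (a ≤ p.1 ∧ p.1 < b)
        | _, _ => false)
    then "<!-- ARCHIVED CH" ++ PySem.Int.toStr p.1 ++ " --> " ++ p.2
    else p.2))

-- ===== PRECONDITION & SPEC =====
-- Pre_ excludes exactly the sections on which Python A raises KeyError: a section missing "start_line" or "end_line".
def Pre_prune_memory (memory_content : String) (archivable_sections : List (List (String × Int))) : Prop :=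
  ∀ sec ∈ archivable_sections,
    ((PySem.Dict.mk sec).get? "start_line").isSome = true ∧ ((PySem.Dict.mk sec).get? "end_line").isSome = true
instance (memory_content : String) (archivable_sections : List (List (String × Int))) : Decidable (Pre_prune_memory memory_content archivable_sections) := by unfold Pre_prune_memory; infer_instance
def pvWitness_prune_memory : String × (List (List (String × Int))) :=
  ("# h\nalpha\nbeta", [[("start_line", 1), ("end_line", 3)]])

def Spec_prune_memory (memory_content : String) (archivable_sections : List (List (String × Int))) (out : String) : Prop := out = prune_memory_alt memory_content archivable_sections
instance (memory_content : String) (archivable_sections : List (List (String × Int))) (out : String) : Decidable (Spec_prune_memory memory_content archivable_sections out) := by unfold Spec_prune_memory; infer_instance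

-- ===== CLAIM (what is proved, stated in full; the proofs are below) =====
def Claim_equal_prune_memory : Prop := ∀ (memory_content : String) (archivable_sections : List (List (String × Int))), Dom_prune_memory memory_content archivable_sections → Pre_prune_memory memory_content archivable_sections → Spec_prune_memory memory_content archivable_sections (prune_memory memory_content archivable_sections)

-- ===== LEMMAS AND PROOFS =====

-- membership in A's to_mark set, generalized over the running accumulator
theorem mem_pruneToMark_aux (secs : List (List (String × Int))) (i : Int) (acc : PySem.Set Int) :
    (i ∈ secs.foldl (fun acc sec =>
      match (PySem.Dict.mk sec).get? "start_line", (PySem.Dict.mk sec).get? "end_line" with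
      | some a, some b => (PySem.List.pyRange a b).foldl (fun s i => s.add i) acc
      | _, _ => acc) acc) ↔ i ∈ acc ∨ (secs.any (fun sec =>
      match (PySem.Dict.mk sec).get? "start_line", (PySem.Dict.mk sec).get? "end_line" with
      | some a, some b => decide (a ≤ i ∧ i < b)
      | _, _ => false)) = true := by
  induction secs generalizing acc with
  | nil => simp
  | cons sec rest ih =>
    simp only [List.foldl_cons, List.any_cons, Bool.or_eq_true]
    rcases hs : (PySem.Dict.mk sec).get? "start_line" with _ | a <;>
      rcases he : (PySem.Dict.mk sec).get? "end_line" with _ | b <;>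
      simp only [ih] <;> try tauto
    rw [PySem.Set.mem_foldl_add (f := fun (x : Int) => x)]
    constructor
    · rintro ((h | ⟨x, hx, rfl⟩) | h)
      · exact Or.inl h
      · exact Or.inr (Or.inl (by simpa using PySem.List.mem_pyRange_one.mp hx))
      · exact Or.inr (Or.inr h)
    · rintro (h | h | h)
      · exact Or.inl (Or.inl h)
      · exact Or.inl (Or.inr ⟨i, PySem.List.mem_pyRange_one.mpr (by simpa using h), rfl⟩)
      · exact Or.inr h

-- membership in A's to_mark set is B's interval scan
theorem contains_pruneToMark (secs : List (List (String × Int))) (i : Int) :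
    (pruneToMark secs).contains i = secs.any (fun sec =>
      match (PySem.Dict.mk sec).get? "start_line", (PySem.Dict.mk sec).get? "end_line" with
      | some a, some b => decide (a ≤ i ∧ i < b)
      | _, _ => false) := by
  have := mem_pruneToMark_aux secs i PySem.Set.empty
  unfold pruneToMark
  rcases h : secs.any _ with _ | _
  · simp only [h] at this
    simp only [Bool.false_eq_true, or_false] at this
    exact Bool.eq_false_iff.mpr (fun hc => by
      have := this.mp (PySem.Set.contains_iff _ _ |>.mp hc)
      simp [PySem.Set.empty] at this)
  · exact (PySem.Set.contains_iff _ _).mpr (this.mpr (Or.inr h))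

-- the two-branch append loop of A's result_lines as a map (shape not in the PySem book)
theorem foldl_append_ite_pair {α β : Type} (l : List α) (C : α → Prop) [DecidablePred C]
    (f g : α → β) (acc : List β) :
    l.foldl (fun acc x => if C x then acc ++ [f x] else acc ++ [g x]) acc
      = acc ++ l.map (fun x => if C x then f x else g x) := by
  induction l generalizing acc with
  | nil => simp
  | cons x t ih => by_cases h : C x <;> simp [h, ih]

set_option maxHeartbeats 1000000 in
theorem prune_memory_spec : Claim_equal_prune_memory := by
  intro mc secs hdom hpre
  unfold Spec_prune_memory
  simp only [prune_memory, prune_memory_alt]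
  apply congrArg
  rw [foldl_append_ite_pair]
  apply List.map_congr_left
  intro p _
  simp only [contains_pruneToMark]
  exact if_congr (by tauto) rfl rfl
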